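-- pv_equiv track=rewrite | github.com/jchinnam/advent-of-code | 2021/10/10.py | part_one
-- ===== SOURCE A (Python) =====
-- def part_one(data):
--     match = {')':'(','}':'{', ']':'[', '>': '<'}
--     scores = {')': 3, ']': 57, '}': 1197, '>': 25137}
--
--     points = 0
--     for line in data:
--         stack = []
--         for i in range(len(line)):
--             char = line[i]
--
--             if char == '(' or char == '{' or char == '[' or char == '<': # if start append, can't match
--                 stack.append(char)
--             elif len(stack) != 0 and stack[-1] == match[char]: # if top is match, pop stack
--                 stack.pop()
--             else:
--                 points += scores[char] # corrupted
--                 break # exit this line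
--
--     return points
-- ===== SOURCE B (Python) =====
-- def part_one(data):
--     scores = {')': 3, ']': 57, '}': 1197, '>': 25137}
--     total = 0
--     for line in data:
--         s = line
--         prev = None
--         while s != prev:
--             prev = s
--             s = s.replace('()', '').replace('[]', '').replace('{}', '').replace('<>', '')
--         for ch in s:
--             if ch in scores:
--                 total += scores[ch]
--                 break
--     return total
-- ===== Notes on version B (the rewrite author's own statement) =====
-- stated objective: alternative
-- what changed: Replaces the single-pass stack scan with a stackless fixpoint reduction: each line is repeatedly stripped of adjacent matched pairs via str.replace until it stops changing, and the first surviving closing bracket (if any) supplies the line's corruption score.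
-- outside the precondition, e.g. on part_one(['(]a']): A returns 57, B returns 57
import Mathlib
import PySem

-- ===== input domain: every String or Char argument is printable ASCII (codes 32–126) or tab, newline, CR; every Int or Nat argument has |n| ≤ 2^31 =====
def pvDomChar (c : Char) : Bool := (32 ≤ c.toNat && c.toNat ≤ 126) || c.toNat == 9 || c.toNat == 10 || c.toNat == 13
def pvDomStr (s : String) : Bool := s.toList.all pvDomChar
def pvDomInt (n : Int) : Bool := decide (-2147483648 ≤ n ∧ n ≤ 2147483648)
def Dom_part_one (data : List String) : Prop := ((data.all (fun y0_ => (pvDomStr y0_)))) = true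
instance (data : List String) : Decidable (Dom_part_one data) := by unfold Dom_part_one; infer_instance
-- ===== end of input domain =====

-- B replaces A's stack scan with a stackless fixpoint pair-cancellation (str.replace until
-- unchanged, then score the first surviving closer): an alternative algorithm, not claimed faster.


-- ===== PORT A =====
-- match = {')':'(', '}':'{', ']':'[', '>':'<'}
def paMatch : PySem.Dict Char Char :=
  ((((PySem.Dict.empty).insert ')' '(').insert '}' '{').insert ']' '[').insert '>' '<'
-- scores = {')': 3, ']': 57, '}': 1197, '>': 25137}
def paScores : PySem.Dict Char Int :=
  ((((PySem.Dict.empty).insert ')' (3 : Int)).insert ']' 57).insert '}' 1197).insert '>' 25137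
-- the inner 'for i in range(len(line))' loop; stack top is the list head (Python appends/pops
-- at the end); 'none' = the KeyError Python raises on a non-bracket char (excluded by Pre_),
-- 'some v' = the line contributes v points (0 when the loop ends without a break).
def paLine : List Char → List Char → Option Int
  | [], _ => some 0
  | ch :: rest, stack =>
    if ch = '(' ∨ ch = '{' ∨ ch = '[' ∨ ch = '<' then
      paLine rest (ch :: stack)
    else
      match stack with
      | top :: stack' =>
        match paMatch.get? ch with
        | some m => if top = m then paLine rest stack' else paScores.get? ch
        | none => none
      | [] => paScores.get? ch

def part_one (data : List String) : Int :=
  data.foldl (fun points line =>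
    match paLine line.toList [] with
    | some v => points + v
    | none => points) 0    -- the none branch is Python's KeyError, unreachable under Pre_

-- ===== PORT B =====
-- s.replace('()','').replace('[]','').replace('{}','').replace('<>','')
def pbStep (s : List Char) : List Char :=
  PySem.Chars.replace (PySem.Chars.replace (PySem.Chars.replace
    (PySem.Chars.replace s ['(', ')'] []) ['[', ']'] []) ['{', '}'] []) ['<', '>'] []
-- the 'while s != prev' loop; fuel (length + 1) only makes the recursion structural
def pbReduce : Nat → Option (List Char) → List Char → List Char
  | 0, _, s => s
  | fuel + 1, prev, s => if prev = some s then s else pbReduce fuel (some s) (pbStep s)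
-- scores = {')': 3, ']': 57, '}': 1197, '>': 25137}
def pbScores : PySem.Dict Char Int :=
  ((((PySem.Dict.empty).insert ')' (3 : Int)).insert ']' 57).insert '}' 1197).insert '>' 25137
-- 'for ch in s: if ch in scores: total += scores[ch]; break'
def pbLine (s : List Char) : Int :=
  match s.find? (fun ch => (pbScores.get? ch).isSome) with
  | some ch => (pbScores.get? ch).getD 0
  | none => 0

def part_one_alt (data : List String) : Int :=
  data.foldl (fun total line =>
    total + pbLine (pbReduce (line.toList.length + 1) none line.toList)) 0

-- ===== PRECONDITION & SPEC =====
def openerB (c : Char) : Bool := c == '(' || c == '{' || c == '[' || c == '<'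
def closerB (c : Char) : Bool := c == ')' || c == ']' || c == '}' || c == '>'
def bracketB (c : Char) : Bool := openerB c || closerB c
-- Pre_ excludes lines containing a non-bracket character: when A's scan reaches one it raises
-- KeyError (match[char]/scores[char]); A returns only on such lines whose corruption precedes
-- the first non-bracket char, a corner where both programs happen to agree anyway.
def Pre_part_one (data : List String) : Prop :=
  (data.all fun line => line.toList.all bracketB) = true
instance (data : List String) : Decidable (Pre_part_one data) := by unfold Pre_part_one; infer_instance

def pvWitness_part_one : List String := ["([])", "(]", "<<"]

def Spec_part_one (data : List String) (out : Int) : Prop := out = part_one_alt data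
instance (data : List String) (out : Int) : Decidable (Spec_part_one data out) := by unfold Spec_part_one; infer_instance

-- ===== CLAIM (what is proved, stated in full; the proofs are below) =====
def Claim_equal_part_one : Prop := ∀ (data : List String), Dom_part_one data → Pre_part_one data → Spec_part_one data (part_one data)

-- ===== LEMMAS AND PROOFS =====

-- the opener of each closer (junk default elsewhere)
def matchOf (c : Char) : Char :=
  if c = ')' then '(' else if c = ']' then '[' else if c = '}' then '{' else if c = '>' then '<' else ' '
def scoreOf (c : Char) : Int :=
  if c = ')' then 3 else if c = ']' then 57 else if c = '}' then 1197 else if c = '>' then 25137 else 0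

-- abstract single-pass scan: the first corrupted closer of a line (stack top = head)
def scan : List Char → List Char → Option Char
  | [], _ => none
  | ch :: rest, st =>
    if openerB ch then scan rest (ch :: st)
    else match st with
      | top :: st' => if top = matchOf ch then scan rest st' else some ch
      | [] => some ch

def optScore : Option Char → Int
  | some c => scoreOf c
  | none => 0

-- removal of all (left-to-right, non-overlapping) adjacent occurrences of the pair o,c
def rem (o c : Char) : List Char → List Char
  | [] => []
  | [a] => [a]
  | a :: b :: t => if a = o ∧ b = c then rem o c t else a :: rem o c (b :: t)

def noPairB (o c : Char) : List Char → Bool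
  | [] => true
  | [_] => true
  | a :: b :: t => !(a == o && b == c) && noPairB o c (b :: t)

lemma closer_cases (c : Char) (hb : bracketB c = true) (ho : openerB c = false) :
    c = ')' ∨ c = ']' ∨ c = '}' ∨ c = '>' := by
  simp [bracketB, ho, closerB] at hb
  tauto

lemma opener_not_closer (a : Char) (h : openerB a = true) : closerB a = false := by
  simp [openerB] at h
  rcases h with ((h | h) | h) | h <;> subst h <;> decide

lemma paDicts (ch : Char) (h : closerB ch = true) :
    paMatch.get? ch = some (matchOf ch) ∧ paScores.get? ch = some (scoreOf ch) := by
  simp [closerB] at h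
  rcases h with ((h | h) | h) | h <;> subst h <;> exact And.intro rfl rfl

lemma paLine_eq_scan (cs : List Char) : ∀ st, (∀ a ∈ cs, bracketB a = true) →
    paLine cs st = some (optScore (scan cs st)) := by
  induction cs with
  | nil => intro st _; rfl
  | cons ch rest ih =>
    intro st h
    have hrest : ∀ a ∈ rest, bracketB a = true := fun a ha => h a (List.mem_cons_of_mem _ ha)
    by_cases hop : ch = '(' ∨ ch = '{' ∨ ch = '[' ∨ ch = '<'
    · have hob : openerB ch = true := by
        rcases hop with h' | h' | h' | h' <;> subst h' <;> decide
      simp only [paLine, scan, if_pos hop, hob, if_true]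
      exact ih _ hrest
    · have hob : openerB ch = false := by
        simp [openerB]
        tauto
      have hbr : bracketB ch = true := h ch List.mem_cons_self
      have hcl : closerB ch = true := by
        rcases closer_cases ch hbr hob with hc | hc | hc | hc <;> simp [closerB, hc]
      obtain ⟨hm, hs⟩ := paDicts ch hcl
      cases st with
      | nil =>
        simp only [paLine, scan, if_neg hop, hob, Bool.false_eq_true, if_false]
        rw [hs]
        rfl
      | cons top st' =>
        simp only [paLine, scan, if_neg hop, hob, Bool.false_eq_true, if_false]
        rw [hm]
        by_cases htop : top = matchOf ch
        · simp only [if_pos htop]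
          exact ih _ hrest
        · simp only [if_neg htop]
          rw [hs]
          rfl

lemma replace_go_eq (o c : Char) : ∀ (fuel : Nat) (s acc : List Char), s.length ≤ fuel →
    PySem.Chars.replace.go [o, c] [] fuel s acc = acc.reverse ++ rem o c s := by
  intro fuel
  induction fuel with
  | zero =>
    intro s acc hs
    have : s = [] := List.length_eq_zero_iff.mp (Nat.le_zero.mp hs)
    subst this
    simp [PySem.Chars.replace.go, rem]
  | succ f ih =>
    intro s acc hs
    match s with
    | [] => simp [PySem.Chars.replace.go, rem]
    | [a] =>
      have hpre : List.isPrefixOf [o, c] [a] = false := by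
        simp [List.isPrefixOf]
      simp only [PySem.Chars.replace.go, hpre, Bool.false_eq_true, if_false]
      have := ih [] (a :: acc) (by simp)
      simp [rem] at this ⊢
      simpa using this
    | a :: b :: t =>
      by_cases hab : a = o ∧ b = c
      · obtain ⟨rfl, rfl⟩ := hab
        have hpre : List.isPrefixOf [a, b] (a :: b :: t) = true := by
          simp [List.isPrefixOf]
        simp only [PySem.Chars.replace.go, hpre, if_true]
        have := ih t acc (by simp at hs ⊢; omega)
        simpa [rem, List.drop] using this
      · have hpre : List.isPrefixOf [o, c] (a :: b :: t) = false := by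
        -- isPrefixOf is (o == a) && (c == b) && true here; false since ¬(a = o ∧ b = c)
          simp [List.isPrefixOf]
          intro h1 h2
          exact absurd ⟨h1.symm, h2.symm⟩ hab
        simp only [PySem.Chars.replace.go, hpre, Bool.false_eq_true, if_false]
        have := ih (b :: t) (a :: acc) (by simp at hs ⊢; omega)
        rw [this]
        simp [rem, hab]

lemma replace_eq_rem (o c : Char) (s : List Char) :
    PySem.Chars.replace s [o, c] [] = rem o c s := by
  simpa [PySem.Chars.replace] using replace_go_eq o c s.length s [] le_rfl

lemma scan_rem (o c : Char) (ho : openerB o = true) (hc : openerB c = false) (hm : matchOf c = o)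
    (s : List Char) : ∀ st, scan (rem o c s) st = scan s st := by
  induction s using rem.induct (o := o) (c := c) with
  | case1 => intro st; rfl
  | case2 a => intro st; rfl
  | case3 a b t hab ih =>
    obtain ⟨rfl, rfl⟩ := hab
    intro st
    rw [show rem a b (a :: b :: t) = rem a b t by simp [rem]]
    rw [ih st]
    simp [scan, ho, hc, hm]
  | case4 a b t hab ih =>
    intro st
    rw [show rem o c (a :: b :: t) = a :: rem o c (b :: t) by simp [rem, hab]]
    by_cases hoa : openerB a = true
    · simp only [scan, hoa, if_true]
      exact ih _
    · simp only [Bool.not_eq_true] at hoa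
      simp only [scan, hoa, Bool.false_eq_true, if_false]
      cases st with
      | nil => rfl
      | cons top st' =>
        by_cases htop : top = matchOf a
        · simp only [if_pos htop]
          exact ih _
        · simp only [if_neg htop]

lemma rem_length_le (o c : Char) (s : List Char) : (rem o c s).length ≤ s.length := by
  induction s using rem.induct (o := o) (c := c) with
  | case1 => simp [rem]
  | case2 a => simp [rem]
  | case3 a b t hab ih => obtain ⟨rfl, rfl⟩ := hab; simp [rem]; omega
  | case4 a b t hab ih => simp only [rem, if_neg hab]; simp at ih ⊢; omega

lemma rem_eq_of_length (o c : Char) (s : List Char)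
    (h : (rem o c s).length = s.length) : rem o c s = s := by
  induction s using rem.induct (o := o) (c := c) with
  | case1 => rfl
  | case2 a => rfl
  | case3 a b t hab ih =>
    obtain ⟨rfl, rfl⟩ := hab
    exfalso
    rw [show rem a b (a :: b :: t) = rem a b t by simp [rem]] at h
    have := rem_length_le a b t
    simp at h
    omega
  | case4 a b t hab ih =>
    rw [show rem o c (a :: b :: t) = a :: rem o c (b :: t) by simp [rem, hab]] at h ⊢
    simp at h
    rw [ih h]

lemma rem_subset (o c : Char) (s : List Char) : ∀ a ∈ rem o c s, a ∈ s := by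
  induction s using rem.induct (o := o) (c := c) with
  | case1 => intro x hx; simp [rem] at hx
  | case2 a => simp [rem]
  | case3 a b t hab ih =>
    obtain ⟨rfl, rfl⟩ := hab
    rw [show rem a b (a :: b :: t) = rem a b t by simp [rem]]
    intro x hx
    exact List.mem_cons_of_mem _ (List.mem_cons_of_mem _ (ih x hx))
  | case4 a b t hab ih =>
    rw [show rem o c (a :: b :: t) = a :: rem o c (b :: t) by simp [rem, hab]]
    intro x hx
    rcases List.mem_cons.mp hx with rfl | hx
    · exact List.mem_cons_self
    · exact List.mem_cons_of_mem _ (ih x hx)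

lemma noPair_of_rem_fix (o c : Char) (s : List Char) (h : rem o c s = s) :
    noPairB o c s = true := by
  induction s using rem.induct (o := o) (c := c) with
  | case1 => rfl
  | case2 a => rfl
  | case3 a b t hab ih =>
    obtain ⟨rfl, rfl⟩ := hab
    exfalso
    rw [show rem a b (a :: b :: t) = rem a b t by simp [rem]] at h
    have h1 := rem_length_le a b t
    have h2 := congrArg List.length h
    simp at h2
    omega
  | case4 a b t hab ih =>
    rw [show rem o c (a :: b :: t) = a :: rem o c (b :: t) by simp [rem, hab]] at h
    simp only [List.cons.injEq, true_and] at h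
    have hnp := ih h
    simp [noPairB, hnp]
    tauto

lemma noPair_tail (o c x : Char) (rest : List Char) (h : noPairB o c (x :: rest) = true) :
    noPairB o c rest = true := by
  cases rest with
  | nil => rfl
  | cons b t =>
    simp only [noPairB, Bool.and_eq_true] at h
    exact h.2

lemma noPair_adj (o c : Char) : ∀ (u : List Char) {a b : Char} {v : List Char},
    noPairB o c (u ++ a :: b :: v) = true → ¬(a = o ∧ b = c) := by
  intro u
  induction u with
  | nil =>
    intro a b v h
    simp only [List.nil_append, noPairB, Bool.and_eq_true, Bool.not_eq_true'] at h
    rcases h with ⟨h1, _⟩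
    simp only [Bool.and_eq_false_iff, beq_eq_false_iff_ne, ne_eq] at h1
    tauto
  | cons x u' ih =>
    intro a b v h
    exact ih (noPair_tail o c x _ h)

lemma pbStep_eq (s : List Char) :
    pbStep s = rem '<' '>' (rem '{' '}' (rem '[' ']' (rem '(' ')' s))) := by
  simp [pbStep, replace_eq_rem]

lemma scan_pbStep (s : List Char) (st : List Char) : scan (pbStep s) st = scan s st := by
  rw [pbStep_eq]
  rw [scan_rem '<' '>' rfl rfl rfl, scan_rem '{' '}' rfl rfl rfl,
      scan_rem '[' ']' rfl rfl rfl, scan_rem '(' ')' rfl rfl rfl]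

lemma pbStep_subset (s : List Char) : ∀ a ∈ pbStep s, a ∈ s := by
  rw [pbStep_eq]
  intro a ha
  exact rem_subset _ _ _ a (rem_subset _ _ _ a (rem_subset _ _ _ a (rem_subset _ _ _ a ha)))

lemma pbStep_fix_chain (s : List Char) (h : s.length ≤ (pbStep s).length) :
    rem '(' ')' s = s ∧ rem '[' ']' s = s ∧ rem '{' '}' s = s ∧ rem '<' '>' s = s ∧
      pbStep s = s := by
  rw [pbStep_eq] at h ⊢
  have l1 := rem_length_le '(' ')' s
  have l2 := rem_length_le '[' ']' (rem '(' ')' s)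
  have l3 := rem_length_le '{' '}' (rem '[' ']' (rem '(' ')' s))
  have l4 := rem_length_le '<' '>' (rem '{' '}' (rem '[' ']' (rem '(' ')' s)))
  have e1 : rem '(' ')' s = s := rem_eq_of_length _ _ _ (by omega)
  rw [e1] at l2 l3 l4 h
  have e2 : rem '[' ']' s = s := rem_eq_of_length _ _ _ (by omega)
  rw [e2] at l3 l4 h
  have e3 : rem '{' '}' s = s := rem_eq_of_length _ _ _ (by omega)
  rw [e3] at l4 h
  have e4 : rem '<' '>' s = s := rem_eq_of_length _ _ _ (by omega)
  exact ⟨e1, e2, e3, e4, by rw [e1, e2, e3, e4]⟩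

lemma pbStep_noPair (s : List Char) (h : pbStep s = s) :
    noPairB '(' ')' s = true ∧ noPairB '[' ']' s = true ∧
    noPairB '{' '}' s = true ∧ noPairB '<' '>' s = true := by
  obtain ⟨e1, e2, e3, e4, _⟩ := pbStep_fix_chain s (by rw [h])
  exact ⟨noPair_of_rem_fix _ _ _ e1, noPair_of_rem_fix _ _ _ e2,
    noPair_of_rem_fix _ _ _ e3, noPair_of_rem_fix _ _ _ e4⟩

lemma pbStep_length_lt (s : List Char) (h : pbStep s ≠ s) : (pbStep s).length < s.length := by
  by_contra hlt
  exact h (pbStep_fix_chain s (Nat.le_of_not_lt hlt)).2.2.2.2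

lemma reduce_spec : ∀ (fuel : Nat) (s : List Char) (prev : Option (List Char)),
    (prev = some s → pbStep s = s) → (s.length < fuel ∨ pbStep s = s) →
    pbStep (pbReduce fuel prev s) = pbReduce fuel prev s ∧
      (∀ st, scan (pbReduce fuel prev s) st = scan s st) ∧
      (∀ a ∈ pbReduce fuel prev s, a ∈ s) := by
  intro fuel
  induction fuel with
  | zero =>
    intro s prev _ hlen
    have hfix : pbStep s = s := hlen.resolve_left (by omega)
    exact ⟨hfix, fun st => rfl, fun a ha => ha⟩
  | succ f ih =>
    intro s prev hprev hlen
    by_cases hp : prev = some s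
    · rw [show pbReduce (f + 1) prev s = s by simp [pbReduce, hp]]
      exact ⟨hprev hp, fun st => rfl, fun a ha => ha⟩
    · rw [show pbReduce (f + 1) prev s = pbReduce f (some s) (pbStep s) by simp [pbReduce, hp]]
      have hprev' : some s = some (pbStep s) → pbStep (pbStep s) = pbStep s := by
        intro he
        have hss : s = pbStep s := Option.some.inj he
        rw [← hss]
        exact hss.symm
      have hlen' : (pbStep s).length < f ∨ pbStep (pbStep s) = pbStep s := by
        by_cases hfix : pbStep s = s
        · right; simp [hfix]
        · left
          have := pbStep_length_lt s hfix
          rcases hlen with h | h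
          · omega
          · exact absurd h hfix
      obtain ⟨h1, h2, h3⟩ := ih (pbStep s) (some s) hprev' hlen'
      exact ⟨h1, fun st => (h2 st).trans (scan_pbStep s st),
        fun a ha => pbStep_subset s a (h3 a ha)⟩

lemma scan_openers : ∀ (os t st : List Char), (∀ a ∈ os, openerB a = true) →
    scan (os ++ t) st = scan t (os.reverse ++ st) := by
  intro os
  induction os with
  | nil => intro t st _; rfl
  | cons a os' ih =>
    intro t st h
    have ha : openerB a = true := h a List.mem_cons_self
    rw [List.cons_append, show scan (a :: (os' ++ t)) st = scan (os' ++ t) (a :: st) by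
      simp [scan, ha]]
    rw [ih t (a :: st) (fun x hx => h x (List.mem_cons_of_mem _ hx))]
    simp

lemma scan_nf (R : List Char) (halpha : ∀ a ∈ R, bracketB a = true)
    (h1 : noPairB '(' ')' R = true) (h2 : noPairB '[' ']' R = true)
    (h3 : noPairB '{' '}' R = true) (h4 : noPairB '<' '>' R = true) :
    scan R [] = R.find? closerB := by
  have hdec : List.takeWhile openerB R ++ List.dropWhile openerB R = R :=
    List.takeWhile_append_dropWhile
  have hos : ∀ a ∈ List.takeWhile openerB R, openerB a = true := fun a ha =>
    List.mem_takeWhile_imp ha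
  have hfos : List.find? closerB (List.takeWhile openerB R) = none :=
    List.find?_eq_none.mpr (fun a ha => by simp [opener_not_closer a (hos a ha)])
  conv_lhs => rw [← hdec]
  conv_rhs => rw [← hdec]
  rw [scan_openers _ _ _ hos, List.find?_append, hfos, Option.none_or]
  cases hrest : List.dropWhile openerB R with
  | nil => simp [scan]
  | cons ch v =>
    have hcop : openerB ch = false := by
      have := List.head?_dropWhile_not openerB R
      rw [hrest] at this
      simpa using this
    have hcmem : ch ∈ R := by
      rw [← hdec]
      exact List.mem_append_right _ (by rw [hrest]; exact List.mem_cons_self)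
    have hcc : closerB ch = true := by
      have := halpha ch hcmem
      simp [bracketB, hcop] at this
      exact this
    rw [show List.find? closerB (ch :: v) = some ch by simp [List.find?_cons_of_pos, hcc]]
    rcases List.eq_nil_or_concat (List.takeWhile openerB R) with hnil | ⟨os', a, hcat⟩
    · rw [hnil]
      simp [scan, hcop]
    · rw [hcat]
      have ha : openerB a = true := hos a (by rw [hcat]; simp)
      have hadj : ¬(a = matchOf ch ∧ ch = ch) := by
        have hR : os' ++ a :: ch :: v = R := by
          rw [← hdec, hrest, hcat]
          simp
        rcases closer_cases ch (halpha ch hcmem) hcop with hc | hc | hc | hc <;> subst hc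
        · exact noPair_adj '(' ')' os' (by rw [hR]; exact h1)
        · exact noPair_adj '[' ']' os' (by rw [hR]; exact h2)
        · exact noPair_adj '{' '}' os' (by rw [hR]; exact h3)
        · exact noPair_adj '<' '>' os' (by rw [hR]; exact h4)
      have hne : a ≠ matchOf ch := fun he => hadj ⟨he, rfl⟩
      simp only [List.concat_eq_append, List.reverse_append, List.reverse_cons,
        List.reverse_nil, List.nil_append, List.cons_append, List.append_nil]
      simp [scan, hcop, hne]

lemma pbPred_eq_closerB : (fun ch => (pbScores.get? ch).isSome) = closerB := by
  funext ch
  by_cases h4 : ch = '>'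
  · subst h4; decide
  · rw [show pbScores.get? ch = ((((PySem.Dict.empty).insert ')' (3 : Int)).insert ']' 57).insert '}' 1197).get? ch from PySem.Dict.get?_insert_of_ne _ _ h4]
    by_cases h3 : ch = '}'
    · subst h3; decide
    · rw [PySem.Dict.get?_insert_of_ne _ _ h3]
      by_cases h2 : ch = ']'
      · subst h2; decide
      · rw [PySem.Dict.get?_insert_of_ne _ _ h2]
        by_cases h1 : ch = ')'
        · subst h1; decide
        · rw [PySem.Dict.get?_insert_of_ne _ _ h1]
          simp [closerB, h1, h2, h3, h4, PySem.Dict.empty, PySem.Dict.get?]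

lemma line_eq (line : List Char) (h : ∀ a ∈ line, bracketB a = true) :
    paLine line [] = some (pbLine (pbReduce (line.length + 1) none line)) := by
  obtain ⟨hfix, hscan, hmem⟩ := reduce_spec (line.length + 1) line none (by simp)
    (Or.inl (by omega))
  obtain ⟨n1, n2, n3, n4⟩ := pbStep_noPair _ hfix
  have halphaR : ∀ a ∈ pbReduce (line.length + 1) none line, bracketB a = true :=
    fun a ha => h a (hmem a ha)
  have hkey : scan line [] = (pbReduce (line.length + 1) none line).find? closerB :=
    (hscan []).symm.trans (scan_nf _ halphaR n1 n2 n3 n4)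
  rw [paLine_eq_scan line [] h, hkey]
  unfold pbLine
  rw [pbPred_eq_closerB]
  cases hf : (pbReduce (line.length + 1) none line).find? closerB with
  | none => rfl
  | some ch =>
    have hcc : closerB ch = true := List.find?_some hf
    simp only [closerB, Bool.or_eq_true, beq_iff_eq] at hcc
    rcases hcc with ((hc | hc) | hc) | hc <;> subst hc <;> rfl

-- per-line equality lifted through the two folds
lemma fold_eq : ∀ (l : List String) (acc : Int),
    (∀ line ∈ l, ∀ a ∈ line.toList, bracketB a = true) →
    List.foldl (fun points line =>
      match paLine line.toList [] with
      | some v => points + v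
      | none => points) acc l =
    List.foldl (fun total line =>
      total + pbLine (pbReduce (line.toList.length + 1) none line.toList)) acc l := by
  intro l
  induction l with
  | nil => intro acc _; rfl
  | cons line rest ih =>
    intro acc h
    simp only [List.foldl_cons]
    rw [line_eq line.toList (h line List.mem_cons_self)]
    exact ih _ (fun x hx => h x (List.mem_cons_of_mem _ hx))

-- ===== VERDICT (by name: the statement is the Claim_ definition above) =====
theorem part_one_spec : Claim_equal_part_one := by
  intro data _ hpre
  unfold Spec_part_one part_one part_one_alt
  apply fold_eq
  unfold Pre_part_one at hpre
  simp only [List.all_eq_true] at hpre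
  exact fun line hl a ha => hpre line hl a ha
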